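-- pv_equiv track=rewrite | github.com/basma812/farkle | farkle/check_sixkind.py | check_sixkind
-- ===== SOURCE A (Python) =====
-- def check_sixkind(dice_list):
--     for i in dice_list:
--         times = dice_list.count(i)
--         if times == 6:
--             if i == 1:
--                 return 10000
--             return 3000
--     return 0
-- ===== SOURCE B (Python) =====
-- def check_sixkind(dice_list):
--     while dice_list:
--         v = dice_list[0]
--         rest = [d for d in dice_list if d != v]
--         if len(dice_list) - len(rest) == 6:
--             return 10000 if v == 1 else 3000
--         dice_list = rest
--     return 0
-- ===== Notes on version B (the rewrite author's own statement) =====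
-- stated objective: alternative
-- what changed: B is a successive-elimination loop: it takes the first value, strips all its copies in one partition pass (its multiplicity is the length drop), scores if that multiplicity is 6, and otherwise continues on the shrunken list, instead of A's scan calling list.count on every die.
import Mathlib
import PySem

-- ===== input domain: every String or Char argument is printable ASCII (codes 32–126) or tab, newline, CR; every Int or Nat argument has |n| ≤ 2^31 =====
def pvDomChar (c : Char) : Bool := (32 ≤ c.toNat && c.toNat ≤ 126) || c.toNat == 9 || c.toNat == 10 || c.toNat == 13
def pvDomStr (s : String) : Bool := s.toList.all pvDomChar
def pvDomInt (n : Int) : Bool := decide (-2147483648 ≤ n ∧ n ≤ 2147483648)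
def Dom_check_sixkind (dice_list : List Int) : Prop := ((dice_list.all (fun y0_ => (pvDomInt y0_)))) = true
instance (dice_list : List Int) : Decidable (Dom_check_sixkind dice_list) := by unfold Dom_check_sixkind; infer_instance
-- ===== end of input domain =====

-- B replaces A's per-die list.count scan by a successive-elimination loop: take the first value,
-- strip all its copies in one partition pass (the multiplicity is the length drop), score or recurse.
-- ===== PORT A =====
def checkSixkindScanA (orig : List Int) : List Int → Int
  | [] => 0
  | i :: rest =>
      if PySem.List.count orig i = 6 then
        (if i = 1 then 10000 else 3000)
      else checkSixkindScanA orig rest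

def check_sixkind (dice_list : List Int) : Int := checkSixkindScanA dice_list dice_list

-- ===== PORT B =====
def check_sixkind_alt (dice_list : List Int) : Int :=
  match dice_list with
  | [] => 0
  | v :: t =>
      let rest := (v :: t).filter (fun d => d != v)
      if (v :: t).length - rest.length = 6 then
        (if v = 1 then 10000 else 3000)
      else check_sixkind_alt rest
termination_by dice_list.length
decreasing_by
  simp only [List.filter]
  have h := List.length_filter_le (fun d => d != v) t
  simp_all

-- ===== PRECONDITION & SPEC =====
def Spec_check_sixkind (dice_list : List Int) (out : Int) : Prop := out = check_sixkind_alt dice_list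
instance (dice_list : List Int) (out : Int) : Decidable (Spec_check_sixkind dice_list out) := by unfold Spec_check_sixkind; infer_instance

-- ===== CLAIM (what is proved, stated in full; the proofs are below) =====
def Claim_equal_check_sixkind : Prop := ∀ (dice_list : List Int), Dom_check_sixkind dice_list → Spec_check_sixkind dice_list (check_sixkind dice_list)

-- ===== LEMMAS AND PROOFS =====

-- the common result shape: first value whose count in the whole list is 6, mapped to the score
def sixRes : Option Int → Int
  | none => 0
  | some v => if v = 1 then 10000 else 3000

lemma scanA_eq (l : List Int) : ∀ s : List Int,
    checkSixkindScanA l s = sixRes (s.find? (fun v => l.count v == 6)) := by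
  intro s
  induction s with
  | nil => rfl
  | cons i rest ih =>
      simp only [checkSixkindScanA, List.find?, PySem.List.count_eq]
      by_cases h : l.count i = 6
      · simp [h, sixRes]
      · have hb : (l.count i == 6) = false := by simpa using h
        simp [h, hb, ih]

lemma find?_congr_mem {α : Type} (p q : α → Bool) :
    ∀ s : List α, (∀ x ∈ s, p x = q x) → s.find? p = s.find? q := by
  intro s
  induction s with
  | nil => intro _; rfl
  | cons a t ih =>
      intro h
      have ha := h a (List.mem_cons_self ..)
      simp only [List.find?, ha]
      cases q a
      · exact ih (fun x hx => h x (List.mem_cons_of_mem _ hx))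
      · rfl

lemma find?_filter_skip {α : Type} (p g : α → Bool)
    (h : ∀ x, g x = false → p x = false) :
    ∀ s : List α, (s.filter g).find? p = s.find? p := by
  intro s
  induction s with
  | nil => rfl
  | cons a t ih =>
      by_cases hg : g a = true
      · simp only [List.filter_cons, hg, if_pos, List.find?]
        cases p a <;> simp [ih]
      · have hg' : g a = false := by simpa using hg
        simp [hg', List.find?, h a hg', ih]

lemma count_add_filter_length (v : Int) : ∀ l : List Int,
    l.count v + (l.filter (fun d => d != v)).length = l.length := by
  intro l
  induction l with
  | nil => rfl
  | cons a t ih =>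
      by_cases h : a = v
      · subst h; simp; omega
      · simp [h, bne_iff_ne]; omega

lemma scanB_eq : ∀ (n : Nat) (l : List Int), l.length ≤ n →
    check_sixkind_alt l = sixRes (l.find? (fun v => l.count v == 6)) := by
  intro n
  induction n with
  | zero =>
      intro l hl
      have : l = [] := List.eq_nil_of_length_eq_zero (Nat.le_zero.mp hl)
      subst this; simp [check_sixkind_alt, sixRes]
  | succ n ih =>
      intro l hl
      match l with
      | [] => simp [check_sixkind_alt, sixRes]
      | v :: t =>
        simp only [check_sixkind_alt]
        set rest := (v :: t).filter (fun d => d != v) with hrest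
        have hlen : (v :: t).length - rest.length = (v :: t).count v := by
          have h0 := count_add_filter_length v (v :: t)
          rw [← hrest] at h0
          omega
        rw [hlen]
        by_cases hc : (v :: t).count v = 6
        · have hv : ((v :: t).count v == 6) = true := by simpa using hc
          simp [hc, List.find?, sixRes]
        · have hv : ((v :: t).count v == 6) = false := by simpa using hc
          have hrt : rest = t.filter (fun d => d != v) := by
            simp [hrest]
          have hrlen : rest.length ≤ n := by
            rw [hrt]
            have h1 := List.length_filter_le (fun d => d != v) t
            have h2 : t.length ≤ n := by simpa using hl
            omega
          rw [if_neg hc, ih rest hrlen]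
          have hcong : ∀ x ∈ rest, (rest.count x == 6) = ((v :: t).count x == 6) := by
            intro x hx
            have hxv' : x ≠ v := by simpa using (List.mem_filter.mp hx).2
            have : rest.count x = (v :: t).count x := by
              rw [hrest, List.count_filter]; simp [hxv']
            rw [this]
          rw [find?_congr_mem _ _ rest hcong, hrt,
            find?_filter_skip (fun w => (v :: t).count w == 6) (fun d => d != v)
              (by intro x hx
                  have : x = v := by simpa using hx
                  subst this; exact hv),
            List.find?_cons_of_neg (by rw [hv]; simp)]

-- ===== VERDICT (by name: the statement is the Claim_ definition above) =====
theorem check_sixkind_spec : Claim_equal_check_sixkind := by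
  intro l _
  unfold Spec_check_sixkind check_sixkind
  rw [scanA_eq, scanB_eq l.length l le_rfl]
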